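-- pv_equiv track=rewrite | github.com/cambroise/biblioLLM | quarto-manager/scripts/convert_rmd.py | convert_callouts
-- ===== SOURCE A (Python) =====
-- def convert_callouts(content: str) -> str:
--     """Convert Rmd custom divs to Quarto callouts."""
--     callout_map = {
--         "rmdnote": "callout-note",
--         "rmdwarning": "callout-warning",
--         "rmdtip": "callout-tip",
--         "rmdimportant": "callout-important",
--         "rmdcaution": "callout-caution",
--     }
--     for rmd_class, qmd_class in callout_map.items():
--         content = content.replace(f".{rmd_class}", f".{qmd_class}")
--     return content
-- ===== SOURCE B (Python) =====
-- def convert_callouts(content: str) -> str: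
--     """Convert Rmd custom divs to Quarto callouts (single left-to-right scan)."""
--     callout_map = {
--         "rmdnote": "callout-note",
--         "rmdwarning": "callout-warning",
--         "rmdtip": "callout-tip",
--         "rmdimportant": "callout-important",
--         "rmdcaution": "callout-caution",
--     }
--     out = []
--     i = 0
--     n = len(content)
--     while i < n:
--         ch = content[i]
--         if ch == '.':
--             for rmd_class, qmd_class in callout_map.items():
--                 if content.startswith(rmd_class, i + 1):
--                     out.append('.' + qmd_class)
--                     i += 1 + len(rmd_class)
--                     break
--             else:
--                 out.append(ch)
--                 i += 1
--         else:
--             out.append(ch)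
--             i += 1
--     return ''.join(out)
-- ===== Notes on version B (the rewrite author's own statement) =====
-- stated objective: alternative
-- what changed: B replaces A's five sequential full-string str.replace passes by a single left-to-right scan that, at each dot character, matches one of the five literal class names and emits the mapped callout class, building the output once; same asymptotic cost, but interpreted per-character Python loses to C-level str.replace, so no speed is claimed.
import Mathlib
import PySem

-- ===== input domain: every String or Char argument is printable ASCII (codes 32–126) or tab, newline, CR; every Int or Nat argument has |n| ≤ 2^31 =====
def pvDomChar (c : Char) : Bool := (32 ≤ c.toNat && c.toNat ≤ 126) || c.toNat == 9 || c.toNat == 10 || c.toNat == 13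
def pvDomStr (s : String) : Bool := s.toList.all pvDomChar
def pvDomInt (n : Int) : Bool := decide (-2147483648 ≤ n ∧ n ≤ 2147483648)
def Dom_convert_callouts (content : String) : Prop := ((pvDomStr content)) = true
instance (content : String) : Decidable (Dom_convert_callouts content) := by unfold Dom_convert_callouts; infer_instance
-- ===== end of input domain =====

-- B replaces A's five sequential full-string str.replace passes by a single left-to-right
-- scan that, at each dot character, matches one of the five literal class names and emits
-- the mapped callout class, building the output once (objective: alternative algorithm).

-- the dict literal both Pythons contain
def pvCalloutMap : PySem.Dict String String :=
  ((((PySem.Dict.empty.insert "rmdnote" "callout-note").insert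
      "rmdwarning" "callout-warning").insert
      "rmdtip" "callout-tip").insert
      "rmdimportant" "callout-important").insert
      "rmdcaution" "callout-caution"

-- ===== PORT A =====
-- for rmd_class, qmd_class in callout_map.items(): content = content.replace("."+rmd, "."+qmd)
def convert_callouts (content : String) : String :=
  pvCalloutMap.items.foldl
    (fun content kv => PySem.Str.replace content ("." ++ kv.1) ("." ++ kv.2))
    content

-- ===== PORT B =====
-- the while-loop of Source B: one left-to-right scan; at '.' the inner for-loop over the dict
-- items (here: List.find?) looks for a class name right after the dot.
def pvScan (ks : List (String × String)) : List Char → List Char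
  | [] => []
  | c :: t =>
    if c = '.' then
      match ks.find? (fun kv => kv.1.toList.isPrefixOf t) with
      | some kv => ('.' :: kv.2.toList) ++ pvScan ks (t.drop kv.1.toList.length)
      | none => c :: pvScan ks t
    else c :: pvScan ks t
termination_by l => l.length
decreasing_by
  all_goals simp

def convert_callouts_alt (content : String) : String :=
  String.ofList (pvScan pvCalloutMap.items content.toList)

-- ===== PRECONDITION & SPEC =====
def Spec_convert_callouts (content : String) (out : String) : Prop := out = convert_callouts_alt content
instance (content : String) (out : String) : Decidable (Spec_convert_callouts content out) := by unfold Spec_convert_callouts; infer_instance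

-- ===== CLAIM (what is proved, stated in full; the proofs are below) =====
def Claim_equal_convert_callouts : Prop := ∀ (content : String), Dom_convert_callouts content → Spec_convert_callouts content (convert_callouts content)

-- ===== LEMMAS AND PROOFS =====

-- the concrete items list of the dict
def pvItems : List (String × String) :=
  [("rmdnote", "callout-note"), ("rmdwarning", "callout-warning"), ("rmdtip", "callout-tip"),
   ("rmdimportant", "callout-important"), ("rmdcaution", "callout-caution")]

lemma pvItems_eq : pvCalloutMap.items = pvItems := by decide

-- one str.replace pass with pattern "." ++ k and replacement "." ++ v
def pvRep (k v : String) (l : List Char) : List Char :=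
  PySem.Chars.replace l ('.' :: k.toList) ('.' :: v.toList)

-- A's five passes, in dict order
def pvComp (l : List Char) : List Char :=
  pvRep "rmdcaution" "callout-caution"
    (pvRep "rmdimportant" "callout-important"
      (pvRep "rmdtip" "callout-tip"
        (pvRep "rmdwarning" "callout-warning"
          (pvRep "rmdnote" "callout-note" l))))

-- non-tail-recursive reference version of PySem.Chars.replace.go
def pvRepl (old new : List Char) : Nat → List Char → List Char
  | 0, l => l
  | _ + 1, [] => []
  | f + 1, c :: t =>
    if old.isPrefixOf (c :: t) then new ++ pvRepl old new f (List.drop old.length (c :: t))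
    else c :: pvRepl old new f t

lemma pvGo_eq (old new : List Char) :
    ∀ (fuel : Nat) (l acc : List Char),
      PySem.Chars.replace.go old new fuel l acc = acc.reverse ++ pvRepl old new fuel l := by
  intro fuel
  induction fuel with
  | zero => intro l acc; simp [PySem.Chars.replace.go, pvRepl]
  | succ f ih =>
    intro l acc
    cases l with
    | nil => simp [PySem.Chars.replace.go, pvRepl]
    | cons c t =>
      rw [PySem.Chars.replace.go]
      by_cases h : old.isPrefixOf (c :: t) = true
      · simp only [h, if_pos, pvRepl, ih]
        simp
      · simp only [h, pvRepl, ih]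
        simp

lemma pvRepl_mono (old new : List Char) (hold : old ≠ []) :
    ∀ (f1 f2 : Nat) (l : List Char), l.length ≤ f1 → l.length ≤ f2 →
      pvRepl old new f1 l = pvRepl old new f2 l := by
  intro f1
  induction f1 with
  | zero =>
    intro f2 l h1 _
    have : l = [] := List.length_eq_zero_iff.mp (Nat.le_zero.mp h1)
    subst this
    cases f2 <;> simp [pvRepl]
  | succ g ih =>
    intro f2 l h1 h2
    cases l with
    | nil => cases f2 <;> simp [pvRepl]
    | cons c t =>
      cases f2 with
      | zero => simp at h2
      | succ g2 =>
        have hlen : 1 ≤ old.length := by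
          cases old with
          | nil => exact absurd rfl hold
          | cons _ _ => simp
        simp only [pvRepl]
        simp only [List.length_cons] at h1 h2
        by_cases h : old.isPrefixOf (c :: t) = true
        · rw [if_pos h, if_pos h,
            ih g2 (List.drop old.length (c :: t))
              (by simp only [List.length_drop, List.length_cons]; omega)
              (by simp only [List.length_drop, List.length_cons]; omega)]
        · rw [if_neg h, if_neg h, ih g2 t (by omega) (by omega)]

lemma pvRep_nil (old new : List Char) (h : old ≠ []) :
    PySem.Chars.replace [] old new = [] := by
  simp only [PySem.Chars.replace]
  rw [if_neg (by simp [h]), pvGo_eq]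
  simp [pvRepl]

lemma pvRep_cons_neg (old new : List Char) (c : Char) (t : List Char) (h : old ≠ [])
    (hp : ¬ old <+: (c :: t)) :
    PySem.Chars.replace (c :: t) old new = c :: PySem.Chars.replace t old new := by
  simp only [PySem.Chars.replace]
  rw [if_neg (by simp [h]), if_neg (by simp [h]), pvGo_eq, pvGo_eq]
  have hb : old.isPrefixOf (c :: t) = false := by
    rw [Bool.eq_false_iff]
    intro hc
    exact hp (List.isPrefixOf_iff_prefix.mp hc)
  simp [pvRepl, hb]

lemma pvRep_pos (old new l : List Char) (h : old ≠ []) (hp : old <+: l) :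
    PySem.Chars.replace l old new = new ++ PySem.Chars.replace (l.drop old.length) old new := by
  cases l with
  | nil =>
    exact absurd (List.prefix_nil.mp hp) h
  | cons c t =>
    simp only [PySem.Chars.replace]
    rw [if_neg (by simp [h]), if_neg (by simp [h]), pvGo_eq, pvGo_eq]
    have hb : old.isPrefixOf (c :: t) = true := List.isPrefixOf_iff_prefix.mpr hp
    have hlen : 1 ≤ old.length := by
      cases old with
      | nil => exact absurd rfl h
      | cons _ _ => simp
    simp only [List.length_cons]
    have e1 : pvRepl old new (t.length + 1) (c :: t)
        = new ++ pvRepl old new t.length (List.drop old.length (c :: t)) := by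
      simp only [pvRepl, hb, reduceIte]
    rw [e1]
    exact congrArg (new ++ ·) (pvRepl_mono old new h t.length _ _
      (by simp only [List.length_drop, List.length_cons]; omega)
      (by simp))

lemma pvRep_dotfree (k v : List Char) :
    ∀ (x y : List Char), '.' ∉ x →
      PySem.Chars.replace (x ++ y) ('.' :: k) ('.' :: v)
        = x ++ PySem.Chars.replace y ('.' :: k) ('.' :: v) := by
  intro x
  induction x with
  | nil => intro y _; simp
  | cons c x' ih =>
    intro y hx
    have hc : c ≠ '.' := fun h => hx (by simp [h])
    have hnp : ¬ ('.' :: k) <+: (c :: (x' ++ y)) := by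
      intro h
      exact hc ((List.cons_prefix_cons.mp h).1.symm)
    rw [List.cons_append, pvRep_cons_neg _ _ _ _ (by simp) hnp,
      ih y (fun h => hx (List.mem_cons_of_mem _ h))]
    rfl

lemma pvNotPrefixTake (p q : List Char) (m : Nat) (hp : m ≤ p.length) (hq : m ≤ q.length)
    (h : p.take m ≠ q.take m) (X : List Char) : ¬ p <+: (q ++ X) := by
  rintro ⟨t, ht⟩
  apply h
  calc p.take m = (p ++ t).take m := (List.take_append_of_le_length hp).symm
    _ = (q ++ X).take m := by rw [ht]
    _ = q.take m := List.take_append_of_le_length hq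

lemma pvPass (k' v' k : List Char) (X : List Char) (hk : '.' ∉ k)
    (h : ¬ ('.' :: k') <+: (('.' :: k) ++ X)) :
    PySem.Chars.replace (('.' :: k) ++ X) ('.' :: k') ('.' :: v')
      = ('.' :: k) ++ PySem.Chars.replace X ('.' :: k') ('.' :: v') := by
  have he : ('.' :: k) ++ X = '.' :: (k ++ X) := rfl
  rw [he] at h ⊢
  rw [pvRep_cons_neg _ _ _ _ (by simp) h, pvRep_dotfree k' v' k X hk]
  rfl

lemma pvHit (k v X : List Char) :
    PySem.Chars.replace (('.' :: k) ++ X) ('.' :: k) ('.' :: v)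
      = ('.' :: v) ++ PySem.Chars.replace X ('.' :: k) ('.' :: v) := by
  rw [pvRep_pos _ _ _ (by simp) (List.prefix_append _ _)]
  rw [List.drop_left]

-- a nonempty dot-free prefix of a replace result is a prefix of the input
lemma pvQ (k v : List Char) :
    ∀ (n : Nat) (w l : List Char), w ≠ [] → '.' ∉ w → l.length ≤ n →
      w <+: PySem.Chars.replace l ('.' :: k) ('.' :: v) → w <+: l := by
  intro n
  induction n with
  | zero =>
    intro w l hw _ hl hp
    have : l = [] := List.length_eq_zero_iff.mp (Nat.le_zero.mp hl)
    subst this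
    rw [pvRep_nil _ _ (by simp)] at hp
    exact absurd (List.prefix_nil.mp hp) hw
  | succ n ih =>
    intro w l hw hdot hl hp
    cases l with
    | nil =>
      rw [pvRep_nil _ _ (by simp)] at hp
      exact absurd (List.prefix_nil.mp hp) hw
    | cons c t =>
      by_cases hm : ('.' :: k) <+: (c :: t)
      · rw [pvRep_pos _ _ _ (by simp) hm] at hp
        cases w with
        | nil => exact absurd rfl hw
        | cons w0 w' =>
          have : w0 = '.' := (List.cons_prefix_cons.mp hp).1
          exact absurd (by simp [this]) hdot
      · rw [pvRep_cons_neg _ _ _ _ (by simp) hm] at hp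
        cases w with
        | nil => exact absurd rfl hw
        | cons w0 w' =>
          obtain ⟨h0, hrest⟩ := List.cons_prefix_cons.mp hp
          cases w' with
          | nil =>
            exact List.cons_prefix_cons.mpr ⟨h0, List.nil_prefix⟩
          | cons w1 w'' =>
            refine List.cons_prefix_cons.mpr ⟨h0, ?_⟩
            exact ih (w1 :: w'') t (by simp) (fun h => hdot (List.mem_cons_of_mem _ h))
              (by simpa using Nat.lt_succ_iff.mp (by simpa using hl)) hrest

lemma pvStepNe (k v : String) (c : Char) (x : List Char) (hc : c ≠ '.') :
    pvRep k v (c :: x) = c :: pvRep k v x := by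
  unfold pvRep
  exact pvRep_cons_neg _ _ _ _ (by simp) (fun h => hc ((List.cons_prefix_cons.mp h).1.symm))

lemma pvCompNe (c : Char) (x : List Char) (hc : c ≠ '.') :
    pvComp (c :: x) = c :: pvComp x := by
  unfold pvComp
  rw [pvStepNe _ _ _ _ hc, pvStepNe _ _ _ _ hc, pvStepNe _ _ _ _ hc,
    pvStepNe _ _ _ _ hc, pvStepNe _ _ _ _ hc]

lemma pvMain : ∀ (n : Nat) (l : List Char), l.length ≤ n → pvComp l = pvScan pvItems l := by
  intro n
  induction n with
  | zero =>
    intro l hl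
    have : l = [] := List.length_eq_zero_iff.mp (Nat.le_zero.mp hl)
    subst this
    simp [pvComp, pvRep, pvScan, pvRep_nil]
  | succ n ih =>
    intro l hl
    cases l with
    | nil => simp [pvComp, pvRep, pvScan, pvRep_nil]
    | cons c t =>
      by_cases hc : c = '.'
      case neg =>
        rw [pvCompNe c t hc, pvScan]
        simp only [hc, reduceIte]
        rw [ih t (by simpa using Nat.lt_succ_iff.mp (by simpa using hl))]
      case pos =>
        subst hc
        by_cases hb1 : "rmdnote".toList.isPrefixOf t = true
        · obtain ⟨u, hu⟩ := List.isPrefixOf_iff_prefix.mp hb1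
          have hl' : ('.' : Char) :: t = ('.' :: "rmdnote".toList) ++ u := by
            rw [← hu]; rfl
          have hul : u.length ≤ n := by
            rw [← hu] at hl; simp at hl; omega
          have hA : pvComp ('.' :: t) = ('.' :: "callout-note".toList) ++ pvComp u := by
            rw [hl']
            unfold pvComp pvRep
            rw [pvHit,
              pvPass _ _ _ _ (by decide) (pvNotPrefixTake _ _ 2 (by decide) (by decide) (by decide) _),
              pvPass _ _ _ _ (by decide) (pvNotPrefixTake _ _ 2 (by decide) (by decide) (by decide) _),
              pvPass _ _ _ _ (by decide) (pvNotPrefixTake _ _ 2 (by decide) (by decide) (by decide) _),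
              pvPass _ _ _ _ (by decide) (pvNotPrefixTake _ _ 2 (by decide) (by decide) (by decide) _)]
          have hB : pvScan pvItems ('.' :: t) = ('.' :: "callout-note".toList) ++ pvScan pvItems u := by
            rw [pvScan]
            simp only [reduceIte, pvItems, List.find?, hb1]
            congr 1
            rw [← hu, List.drop_left]
          rw [hA, hB, ih u hul]
        · by_cases hb2 : "rmdwarning".toList.isPrefixOf t = true
          · obtain ⟨u, hu⟩ := List.isPrefixOf_iff_prefix.mp hb2
            have hl' : ('.' : Char) :: t = ('.' :: "rmdwarning".toList) ++ u := by
              rw [← hu]; rfl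
            have hul : u.length ≤ n := by
              rw [← hu] at hl; simp at hl; omega
            have hA : pvComp ('.' :: t) = ('.' :: "callout-warning".toList) ++ pvComp u := by
              rw [hl']
              unfold pvComp pvRep
              rw [pvPass _ _ _ _ (by decide) (pvNotPrefixTake _ _ 5 (by decide) (by decide) (by decide) _),
                pvHit,
                pvPass _ _ _ _ (by decide) (pvNotPrefixTake _ _ 2 (by decide) (by decide) (by decide) _),
                pvPass _ _ _ _ (by decide) (pvNotPrefixTake _ _ 2 (by decide) (by decide) (by decide) _),
                pvPass _ _ _ _ (by decide) (pvNotPrefixTake _ _ 2 (by decide) (by decide) (by decide) _)]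
            have hB : pvScan pvItems ('.' :: t) = ('.' :: "callout-warning".toList) ++ pvScan pvItems u := by
              rw [pvScan]
              simp only [reduceIte, pvItems, List.find?, hb1, hb2]
              congr 1
              rw [← hu, List.drop_left]
            rw [hA, hB, ih u hul]
          · by_cases hb3 : "rmdtip".toList.isPrefixOf t = true
            · obtain ⟨u, hu⟩ := List.isPrefixOf_iff_prefix.mp hb3
              have hl' : ('.' : Char) :: t = ('.' :: "rmdtip".toList) ++ u := by
                rw [← hu]; rfl
              have hul : u.length ≤ n := by
                rw [← hu] at hl; simp at hl; omega
              have hA : pvComp ('.' :: t) = ('.' :: "callout-tip".toList) ++ pvComp u := by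
                rw [hl']
                unfold pvComp pvRep
                rw [pvPass _ _ _ _ (by decide) (pvNotPrefixTake _ _ 5 (by decide) (by decide) (by decide) _),
                  pvPass _ _ _ _ (by decide) (pvNotPrefixTake _ _ 5 (by decide) (by decide) (by decide) _),
                  pvHit,
                  pvPass _ _ _ _ (by decide) (pvNotPrefixTake _ _ 2 (by decide) (by decide) (by decide) _),
                  pvPass _ _ _ _ (by decide) (pvNotPrefixTake _ _ 2 (by decide) (by decide) (by decide) _)]
              have hB : pvScan pvItems ('.' :: t) = ('.' :: "callout-tip".toList) ++ pvScan pvItems u := by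
                rw [pvScan]
                simp only [reduceIte, pvItems, List.find?, hb1, hb2, hb3]
                congr 1
                rw [← hu, List.drop_left]
              rw [hA, hB, ih u hul]
            · by_cases hb4 : "rmdimportant".toList.isPrefixOf t = true
              · obtain ⟨u, hu⟩ := List.isPrefixOf_iff_prefix.mp hb4
                have hl' : ('.' : Char) :: t = ('.' :: "rmdimportant".toList) ++ u := by
                  rw [← hu]; rfl
                have hul : u.length ≤ n := by
                  rw [← hu] at hl; simp at hl; omega
                have hA : pvComp ('.' :: t) = ('.' :: "callout-important".toList) ++ pvComp u := by
                  rw [hl']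
                  unfold pvComp pvRep
                  rw [pvPass _ _ _ _ (by decide) (pvNotPrefixTake _ _ 5 (by decide) (by decide) (by decide) _),
                    pvPass _ _ _ _ (by decide) (pvNotPrefixTake _ _ 5 (by decide) (by decide) (by decide) _),
                    pvPass _ _ _ _ (by decide) (pvNotPrefixTake _ _ 5 (by decide) (by decide) (by decide) _),
                    pvHit,
                    pvPass _ _ _ _ (by decide) (pvNotPrefixTake _ _ 2 (by decide) (by decide) (by decide) _)]
                have hB : pvScan pvItems ('.' :: t) = ('.' :: "callout-important".toList) ++ pvScan pvItems u := by
                  rw [pvScan]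
                  simp only [reduceIte, pvItems, List.find?, hb1, hb2, hb3, hb4]
                  congr 1
                  rw [← hu, List.drop_left]
                rw [hA, hB, ih u hul]
              · by_cases hb5 : "rmdcaution".toList.isPrefixOf t = true
                · obtain ⟨u, hu⟩ := List.isPrefixOf_iff_prefix.mp hb5
                  have hl' : ('.' : Char) :: t = ('.' :: "rmdcaution".toList) ++ u := by
                    rw [← hu]; rfl
                  have hul : u.length ≤ n := by
                    rw [← hu] at hl; simp at hl; omega
                  have hA : pvComp ('.' :: t) = ('.' :: "callout-caution".toList) ++ pvComp u := by
                    rw [hl']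
                    unfold pvComp pvRep
                    rw [pvPass _ _ _ _ (by decide) (pvNotPrefixTake _ _ 5 (by decide) (by decide) (by decide) _),
                      pvPass _ _ _ _ (by decide) (pvNotPrefixTake _ _ 5 (by decide) (by decide) (by decide) _),
                      pvPass _ _ _ _ (by decide) (pvNotPrefixTake _ _ 5 (by decide) (by decide) (by decide) _),
                      pvPass _ _ _ _ (by decide) (pvNotPrefixTake _ _ 5 (by decide) (by decide) (by decide) _),
                      pvHit]
                  have hB : pvScan pvItems ('.' :: t) = ('.' :: "callout-caution".toList) ++ pvScan pvItems u := by
                    rw [pvScan]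
                    simp only [reduceIte, pvItems, List.find?, hb1, hb2, hb3, hb4, hb5]
                    congr 1
                    rw [← hu, List.drop_left]
                  rw [hA, hB, ih u hul]
                · -- no key matches after this dot: every pass steps over the dot
                  have ht : t.length ≤ n := by simpa using Nat.lt_succ_iff.mp (by simpa using hl)
                  have np1 : ¬ ('.' :: "rmdnote".toList) <+: ('.' :: t) := fun h =>
                    hb1 (List.isPrefixOf_iff_prefix.mpr (List.cons_prefix_cons.mp h).2)
                  have q2 : ¬ ('.' :: "rmdwarning".toList) <+:
                      ('.' :: pvRep "rmdnote" "callout-note" t) := by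
                    intro h
                    have h' := (List.cons_prefix_cons.mp h).2
                    have := pvQ _ _ t.length _ t (by decide) (by decide) le_rfl h'
                    exact hb2 (List.isPrefixOf_iff_prefix.mpr this)
                  have q3 : ¬ ('.' :: "rmdtip".toList) <+:
                      ('.' :: pvRep "rmdwarning" "callout-warning" (pvRep "rmdnote" "callout-note" t)) := by
                    intro h
                    have h' := (List.cons_prefix_cons.mp h).2
                    have h'' := pvQ _ _ (pvRep "rmdnote" "callout-note" t).length _ _
                      (by decide) (by decide) le_rfl h'
                    have := pvQ _ _ t.length _ t (by decide) (by decide) le_rfl h''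
                    exact hb3 (List.isPrefixOf_iff_prefix.mpr this)
                  have q4 : ¬ ('.' :: "rmdimportant".toList) <+:
                      ('.' :: pvRep "rmdtip" "callout-tip" (pvRep "rmdwarning" "callout-warning"
                        (pvRep "rmdnote" "callout-note" t))) := by
                    intro h
                    have h' := (List.cons_prefix_cons.mp h).2
                    have h1 := pvQ _ _ _ _ _ (by decide) (by decide) le_rfl h'
                    have h2 := pvQ _ _ _ _ _ (by decide) (by decide) le_rfl h1
                    have h3 := pvQ _ _ t.length _ t (by decide) (by decide) le_rfl h2
                    exact hb4 (List.isPrefixOf_iff_prefix.mpr h3)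
                  have q5 : ¬ ('.' :: "rmdcaution".toList) <+:
                      ('.' :: pvRep "rmdimportant" "callout-important" (pvRep "rmdtip" "callout-tip"
                        (pvRep "rmdwarning" "callout-warning" (pvRep "rmdnote" "callout-note" t)))) := by
                    intro h
                    have h' := (List.cons_prefix_cons.mp h).2
                    have h1 := pvQ _ _ _ _ _ (by decide) (by decide) le_rfl h'
                    have h2 := pvQ _ _ _ _ _ (by decide) (by decide) le_rfl h1
                    have h3 := pvQ _ _ _ _ _ (by decide) (by decide) le_rfl h2
                    have h4 := pvQ _ _ t.length _ t (by decide) (by decide) le_rfl h3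
                    exact hb5 (List.isPrefixOf_iff_prefix.mpr h4)
                  have hA : pvComp ('.' :: t) = '.' :: pvComp t := by
                    unfold pvComp pvRep
                    unfold pvRep at q2 q3 q4 q5
                    rw [pvRep_cons_neg _ _ _ _ (by simp) np1,
                      pvRep_cons_neg _ _ _ _ (by simp) q2,
                      pvRep_cons_neg _ _ _ _ (by simp) q3,
                      pvRep_cons_neg _ _ _ _ (by simp) q4,
                      pvRep_cons_neg _ _ _ _ (by simp) q5]
                  have hB : pvScan pvItems ('.' :: t) = '.' :: pvScan pvItems t := by
                    rw [pvScan]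
                    simp only [reduceIte, pvItems, List.find?, hb1, hb2, hb3, hb4, hb5]
                  rw [hA, hB, ih t ht]

lemma pvA_eq (content : String) :
    convert_callouts content = String.ofList (pvComp content.toList) := by
  unfold convert_callouts pvComp pvRep
  rw [pvItems_eq]
  simp only [pvItems, List.foldl, PySem.Str.replace, String.toList_ofList,
    String.toList_append, show ("." : String).toList = ['.'] from rfl, List.singleton_append]

lemma pvB_eq (content : String) :
    convert_callouts_alt content = String.ofList (pvScan pvItems content.toList) := by
  unfold convert_callouts_alt
  rw [pvItems_eq]

-- ===== VERDICT (by name: the statement is the Claim_ definition above) =====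
theorem convert_callouts_spec : Claim_equal_convert_callouts := by
  unfold Claim_equal_convert_callouts Spec_convert_callouts
  intro content _
  rw [pvA_eq, pvB_eq, pvMain content.toList.length content.toList le_rfl]
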